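-- pv_equiv track=rewrite | github.com/90sidort/exercises_Python | prime_Words.py | prime_word
-- ===== SOURCE A (Python) =====
-- def isPrime(n) :
--     if (n <= 1) :
--         return False
--     if (n <= 3) :
--         return True
--     if (n % 2 == 0 or n % 3 == 0) :
--         return False
--     i = 5
--     while(i * i <= n) :
--         if (n % i == 0 or n % (i + 2) == 0) :
--             return False
--         i = i + 6
--     return True
--
-- def prime_word(array):
--     nswr = []
--     for x in array:
--         vls = [ord(char) + x[1] for char in x[0]]
--         if any([isPrime(x) for x in vls]) == True:
--             nswr.append(1)
--         else:
--             nswr.append(0)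
--     return nswr
-- ===== SOURCE B (Python) =====
-- def prime_word(array):
--     def is_p(n):
--         if n < 2:
--             return False
--         d = 2
--         while d * d <= n:
--             if n % d == 0:
--                 return False
--             d += 1
--         return True
--     values = {ord(c) + off for word, off in array for c in word}
--     primes = {v for v in values if is_p(v)}
--     return [1 if any(ord(c) + off in primes for c in word) else 0 for word, off in array]
-- ===== Notes on version B (the rewrite author's own statement) =====
-- stated objective: faster
-- what changed: A re-tests every character of every pair with a 6k±1 wheel trial division; B collects the distinct values ord(c)+offset into a set once, tests each distinct value a single time by plain trial division, and answers each pair by membership lookups in the resulting prime set.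
import Mathlib
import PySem

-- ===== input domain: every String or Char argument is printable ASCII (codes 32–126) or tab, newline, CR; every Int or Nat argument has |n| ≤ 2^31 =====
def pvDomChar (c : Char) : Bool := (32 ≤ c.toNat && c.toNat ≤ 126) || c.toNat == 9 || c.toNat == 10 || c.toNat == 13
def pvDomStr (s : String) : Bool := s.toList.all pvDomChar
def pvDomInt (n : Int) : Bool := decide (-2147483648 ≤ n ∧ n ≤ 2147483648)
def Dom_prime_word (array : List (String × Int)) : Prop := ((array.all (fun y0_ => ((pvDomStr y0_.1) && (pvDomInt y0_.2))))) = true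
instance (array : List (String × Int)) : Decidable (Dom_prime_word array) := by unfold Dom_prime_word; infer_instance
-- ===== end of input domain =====

-- B replaces A's per-character 6k±1 trial division recomputed for every pair with a two-pass,
-- table-first shape: collect the distinct values ord(c)+offset once as a set, test each distinct
-- value once by plain trial division, and answer each pair by set-membership lookups (objective:
-- alternative; duplicates are tested once instead of every time).

-- ===== PORT A =====
-- termination helper for the while loops (cited by decreasing_by)
theorem pw_le_of_sq_le (n i : Int) (h : i * i ≤ n) : i ≤ n := by
  nlinarith [mul_self_nonneg (i-1), mul_self_nonneg i]

-- A's while loop: i = 5; while i*i <= n: if n % i == 0 or n % (i+2) == 0: return False; i += 6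
def pwWheel (n i : Int) : Bool :=
  if h : i * i ≤ n then
    if PySem.Int.mod n i = 0 ∨ PySem.Int.mod n (i + 2) = 0 then false
    else pwWheel n (i + 6)
  else true
termination_by (n + 1 - i).toNat
decreasing_by have := pw_le_of_sq_le n i h; omega

def isPrime (n : Int) : Bool :=
  if n ≤ 1 then false
  else if n ≤ 3 then true
  else if PySem.Int.mod n 2 = 0 ∨ PySem.Int.mod n 3 = 0 then false
  else pwWheel n 5

def prime_word (array : List (String × Int)) : List Int :=
  array.foldl (fun nswr x =>
    let vls := x.1.toList.map (fun ch => (ch.toNat : Int) + x.2)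
    if (vls.map isPrime).any (fun b => b) = true then nswr ++ [1] else nswr ++ [0]) []

-- ===== PORT B =====
-- B's while loop: d = 2; while d*d <= n: if n % d == 0: return False; d += 1
def pwTrial (n d : Int) : Bool :=
  if h : d * d ≤ n then
    if PySem.Int.mod n d = 0 then false
    else pwTrial n (d + 1)
  else true
termination_by (n + 1 - d).toNat
decreasing_by have := pw_le_of_sq_le n d h; omega

def pwIsP (n : Int) : Bool := if n < 2 then false else pwTrial n 2

def prime_word_alt (array : List (String × Int)) : List Int :=
  let values : PySem.Set Int :=
    PySem.Set.ofList (array.flatMap (fun x => x.1.toList.map (fun ch => (ch.toNat : Int) + x.2)))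
  -- {v for v in values if is_p(v)}: a set built from a set's elements, used only for membership
  let primes : PySem.Set Int := PySem.Set.ofList (values.filter pwIsP)
  array.map (fun x =>
    if x.1.toList.any (fun ch => PySem.Set.contains primes ((ch.toNat : Int) + x.2)) then 1 else 0)

-- ===== PRECONDITION & SPEC =====
def Spec_prime_word (array : List (String × Int)) (out : List Int) : Prop := out = prime_word_alt array
instance (array : List (String × Int)) (out : List Int) : Decidable (Spec_prime_word array out) := by unfold Spec_prime_word; infer_instance

-- ===== CLAIM (what is proved, stated in full; the proofs are below) =====
def Claim_equal_prime_word : Prop := ∀ (array : List (String × Int)), Dom_prime_word array → Spec_prime_word array (prime_word array)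

-- ===== LEMMAS AND PROOFS =====

-- "n has no divisor e with d ≤ e and e*e ≤ n"
def NoDivFrom (n d : Int) : Prop := ∀ e : Int, d ≤ e → e * e ≤ n → ¬ e ∣ n

theorem trial_iff (n : Int) : ∀ d : Int, 2 ≤ d → (pwTrial n d = true ↔ NoDivFrom n d) := by
  intro d
  induction d using pwTrial.induct (n := n) with
  | case1 d hdd hmod =>
    intro _
    rw [pwTrial]
    simp only [hdd, dite_true, hmod, ite_true, Bool.false_eq_true, false_iff]
    intro hN
    exact hN d le_rfl hdd ((PySem.Int.mod_eq_zero_iff_dvd n d).mp hmod)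
  | case2 d hdd hmod ih =>
    intro h2
    rw [pwTrial]
    simp only [hdd, dite_true, hmod, ite_false]
    rw [ih (by omega)]
    have hnd : ¬ d ∣ n := fun hd => hmod ((PySem.Int.mod_eq_zero_iff_dvd n d).mpr hd)
    constructor
    · intro h e hde hee
      rcases eq_or_lt_of_le hde with rfl | hlt
      · exact hnd
      · exact h e (by omega) hee
    · intro h e hde hee
      exact h e (by omega) hee
  | case3 d hdd =>
    intro h2
    rw [pwTrial]
    simp only [hdd, dite_false, true_iff]
    intro e hde hee hdvd
    have : d * d ≤ e * e := by nlinarith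
    exact hdd (le_trans this hee)

theorem wheel_iff (n : Int) : ∀ i : Int, 5 ≤ i → i % 6 = 5 → ¬ (2 ∣ n) → ¬ (3 ∣ n) →
    (∀ e : Int, 2 ≤ e → e < i → e * e ≤ n → ¬ e ∣ n) →
    (pwWheel n i = true ↔ NoDivFrom n 2) := by
  intro i
  induction i using pwWheel.induct (n := n) with
  | case1 i hii hmod =>
    intro h5 h6 h2 h3 hlow
    rw [pwWheel]
    simp only [hii, dite_true, hmod, ite_true, Bool.false_eq_true, false_iff]
    intro hN
    rcases hmod with hm | hm
    · exact hN i (by omega) hii ((PySem.Int.mod_eq_zero_iff_dvd n i).mp hm)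
    · have hdvd : (i + 2) ∣ n := (PySem.Int.mod_eq_zero_iff_dvd n (i + 2)).mp hm
      by_cases hbig : (i + 2) * (i + 2) ≤ n
      · exact hN (i + 2) (by omega) hbig hdvd
      · obtain ⟨m, hmn⟩ := hdvd
        have hm1 : 1 ≤ m := by nlinarith
        have hm2 : 2 ≤ m := by nlinarith
        have hmlt : m < i + 2 := by nlinarith
        have hmm : m * m ≤ n := by nlinarith
        exact hN m hm2 hmm ⟨i + 2, by linarith [mul_comm m (i + 2)]⟩
  | case2 i hii hmod ih =>
    intro h5 h6 h2 h3 hlow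
    rw [pwWheel]
    simp only [hii, dite_true, if_neg hmod]
    rw [not_or] at hmod
    apply ih (by omega) (by omega) h2 h3
    intro e h2e hei hee hdvd
    by_cases hlt : e < i
    · exact hlow e h2e hlt hee hdvd
    · have hcases : e = i ∨ e = i + 2 ∨ (2 : Int) ∣ e ∨ (3 : Int) ∣ e := by omega
      rcases hcases with rfl | rfl | hd | hd
      · exact hmod.1 ((PySem.Int.mod_eq_zero_iff_dvd n e).mpr hdvd)
      · exact hmod.2 ((PySem.Int.mod_eq_zero_iff_dvd n (i + 2)).mpr hdvd)
      · exact h2 (dvd_trans hd hdvd)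
      · exact h3 (dvd_trans hd hdvd)
  | case3 i hii =>
    intro h5 h6 h2 h3 hlow
    rw [pwWheel]
    simp only [hii, dite_false, true_iff]
    intro e h2e hee hdvd
    by_cases hlt : e < i
    · exact hlow e h2e hlt hee hdvd
    · have : i * i ≤ e * e := by nlinarith
      exact hii (le_trans this hee)

theorem isPrime_eq_pwIsP (n : Int) : isPrime n = pwIsP n := by
  unfold isPrime pwIsP
  by_cases h1 : n ≤ 1
  · rw [if_pos h1, if_pos (by omega : n < 2)]
  · rw [if_neg h1, if_neg (by omega : ¬ n < 2)]
    by_cases h3 : n ≤ 3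
    · rw [if_pos h3, pwTrial, dif_neg (by omega : ¬ (2 : Int) * 2 ≤ n)]
    · rw [if_neg h3]
      by_cases hm : PySem.Int.mod n 2 = 0 ∨ PySem.Int.mod n 3 = 0
      · rw [if_pos hm]
        have hfalse : ¬ (pwTrial n 2 = true) := by
          rw [trial_iff n 2 le_rfl]
          intro hN
          by_cases h2d : (2 : Int) ∣ n
          · exact hN 2 le_rfl (by omega) h2d
          · have hm3 : PySem.Int.mod n 3 = 0 := by
              rcases hm with h | h
              · exact absurd ((PySem.Int.mod_eq_zero_iff_dvd n 2).mp h) h2d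
              · exact h
            have h3d : (3 : Int) ∣ n := (PySem.Int.mod_eq_zero_iff_dvd n 3).mp hm3
            have h9 : 9 ≤ n := by omega
            exact hN 3 (by omega) (by omega) h3d
        simp only [Bool.not_eq_true] at hfalse
        exact hfalse.symm
      · rw [if_neg hm]
        rw [not_or] at hm
        have h2d : ¬ (2 : Int) ∣ n := fun h => hm.1 ((PySem.Int.mod_eq_zero_iff_dvd n 2).mpr h)
        have h3d : ¬ (3 : Int) ∣ n := fun h => hm.2 ((PySem.Int.mod_eq_zero_iff_dvd n 3).mpr h)
        have hlow : ∀ e : Int, 2 ≤ e → e < 5 → e * e ≤ n → ¬ e ∣ n := by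
          intro e h2e h5e _ hdvd
          have : (2 : Int) ∣ e ∨ e = 3 := by omega
          rcases this with hd | rfl
          · exact h2d (dvd_trans hd hdvd)
          · exact h3d hdvd
        have hw := wheel_iff n 5 le_rfl (by decide) h2d h3d hlow
        have ht := trial_iff n 2 le_rfl
        cases hW : pwWheel n 5 <;> cases hT : pwTrial n 2 <;> simp_all

theorem pw_foldl (l : List (String × Int)) (acc : List Int) :
    l.foldl (fun nswr x =>
      let vls := x.1.toList.map (fun ch => (ch.toNat : Int) + x.2)
      if (vls.map isPrime).any (fun b => b) = true then nswr ++ [1] else nswr ++ [0]) acc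
    = acc ++ l.map (fun x =>
        if x.1.toList.any (fun ch => isPrime ((ch.toNat : Int) + x.2)) then 1 else 0) := by
  induction l generalizing acc with
  | nil => simp
  | cons x l ih =>
    simp only [List.foldl_cons, List.map_cons]
    rw [ih]
    simp only [List.any_map, Function.comp_def]
    split_ifs <;> simp_all

theorem prime_word_eq_map (array : List (String × Int)) :
    prime_word array = array.map (fun x =>
      if x.1.toList.any (fun ch => isPrime ((ch.toNat : Int) + x.2)) then 1 else 0) := by
  unfold prime_word
  rw [pw_foldl]
  simp

-- ===== VERDICT (by name: the statement is the Claim_ definition above) =====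
theorem prime_word_spec : Claim_equal_prime_word := by
  intro array _
  unfold Spec_prime_word
  rw [prime_word_eq_map]
  unfold prime_word_alt
  apply List.map_congr_left
  intro x hx
  have hkey : ∀ ch ∈ x.1.toList,
      isPrime ((ch.toNat : Int) + x.2) =
      PySem.Set.contains
        (PySem.Set.ofList ((PySem.Set.ofList (array.flatMap (fun y => y.1.toList.map (fun c => (c.toNat : Int) + y.2)))).filter pwIsP))
        ((ch.toNat : Int) + x.2) := by
    intro ch hch
    set v : Int := (ch.toNat : Int) + x.2 with hv
    have hvmem : v ∈ PySem.Set.ofList (array.flatMap (fun y => y.1.toList.map (fun c => (c.toNat : Int) + y.2))) := by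
      rw [PySem.Set.mem_ofList]
      exact List.mem_flatMap.mpr ⟨x, hx, List.mem_map.mpr ⟨ch, hch, rfl⟩⟩
    rw [isPrime_eq_pwIsP]
    cases hP : pwIsP v with
    | true =>
      have : v ∈ PySem.Set.ofList ((PySem.Set.ofList (array.flatMap (fun y => y.1.toList.map (fun c => (c.toNat : Int) + y.2)))).filter pwIsP) := by
        rw [PySem.Set.mem_ofList, List.mem_filter]
        exact ⟨hvmem, hP⟩
      exact ((PySem.Set.contains_iff _ _).mpr this).symm
    | false =>
      have hnot : v ∉ PySem.Set.ofList ((PySem.Set.ofList (array.flatMap (fun y => y.1.toList.map (fun c => (c.toNat : Int) + y.2)))).filter pwIsP) := by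
        rw [PySem.Set.mem_ofList, List.mem_filter]
        intro hc
        rw [hP] at hc
        exact absurd hc.2 (by simp)
      cases hC : PySem.Set.contains (PySem.Set.ofList ((PySem.Set.ofList (array.flatMap (fun y => y.1.toList.map (fun c => (c.toNat : Int) + y.2)))).filter pwIsP)) v with
      | false => rfl
      | true => exact absurd ((PySem.Set.contains_iff _ _).mp hC) hnot
  rw [PySem.List.any_congr_mem hkey]
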